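-- pv_equiv track=rewrite | github.com/Pheonix-666/College-CS | sem4/TOC/prac7.py | generate_derivation
-- ===== SOURCE A (Python) =====
-- def generate_derivation(input_string):
--     derivation = ["S"]
--     state = "S"
--     for char in input_string:
--         if state == "S":
--             derivation.append(f"{state} -> aA")
--             state = "A"
--         elif state == "A":
--             derivation.append(f"{state} -> aS")
--             state = "S"
--
--     if state == "S":
--         derivation.append("S -> ε")
--     return derivation
-- ===== SOURCE B (Python) =====
-- def generate_derivation(input_string):
--     n = len(input_string)
--     steps = ["S"] + ["S -> aA" if i % 2 == 0 else "A -> aS" for i in range(n)]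
--     if n % 2 == 0:
--         steps.append("S -> \u03b5")
--     return steps
-- ===== Notes on version B (the rewrite author's own statement) =====
-- stated objective: simpler
-- what changed: Replaces the DFA-style toggled state variable with a closed-form computation over the string length: the i-th step is determined by the parity of i (range(n) comprehension), and the final epsilon step by the parity of n.
import Mathlib
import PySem

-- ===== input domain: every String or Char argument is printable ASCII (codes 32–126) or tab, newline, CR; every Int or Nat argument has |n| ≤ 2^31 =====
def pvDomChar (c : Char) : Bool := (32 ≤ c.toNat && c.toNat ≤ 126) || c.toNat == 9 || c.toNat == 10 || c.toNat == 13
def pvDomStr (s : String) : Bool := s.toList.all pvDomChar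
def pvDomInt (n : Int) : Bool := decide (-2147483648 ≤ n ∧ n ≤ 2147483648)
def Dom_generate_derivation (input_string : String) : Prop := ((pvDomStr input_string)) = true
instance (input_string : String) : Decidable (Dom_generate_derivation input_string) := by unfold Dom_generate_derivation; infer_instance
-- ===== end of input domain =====

-- B replaces A's toggled state variable by a closed-form parity computation over the string length (objective: simpler).

-- ===== PORT A =====
-- A's loop body: carries (derivation, state); the character itself is unused.
def pvStepA (p : List String × String) (_ : Char) : List String × String :=
  if p.2 = "S" then (p.1 ++ [p.2 ++ " -> aA"], "A")
  else if p.2 = "A" then (p.1 ++ [p.2 ++ " -> aS"], "S")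
  else p

def generate_derivation (input_string : String) : List String :=
  let r := input_string.toList.foldl pvStepA (["S"], "S")
  if r.2 = "S" then r.1 ++ ["S -> ε"] else r.1

-- ===== PORT B =====
-- B's comprehension body: the i-th production, chosen by the parity of i.
def pvG (i : Nat) : String := if i % 2 = 0 then "S -> aA" else "A -> aS"

def generate_derivation_alt (input_string : String) : List String :=
  let n := input_string.toList.length
  ("S" :: (List.range n).map pvG) ++ (if n % 2 = 0 then ["S -> ε"] else [])

-- ===== PRECONDITION & SPEC =====
def Spec_generate_derivation (input_string : String) (out : List String) : Prop := out = generate_derivation_alt input_string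
instance (input_string : String) (out : List String) : Decidable (Spec_generate_derivation input_string out) := by unfold Spec_generate_derivation; infer_instance

-- ===== CLAIM (what is proved, stated in full; the proofs are below) =====
def Claim_equal_generate_derivation : Prop := ∀ (input_string : String), Dom_generate_derivation input_string → Spec_generate_derivation input_string (generate_derivation input_string)

-- ===== LEMMAS AND PROOFS =====

def pvG' (i : Nat) : String := if i % 2 = 0 then "A -> aS" else "S -> aA"

theorem pvStepA_S (d : List String) (c : Char) :
    pvStepA (d, "S") c = (d ++ ["S -> aA"], "A") := by rfl
theorem pvStepA_A (d : List String) (c : Char) :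
    pvStepA (d, "A") c = (d ++ ["A -> aS"], "S") := by rfl

theorem pvG_succ (i : Nat) : pvG (i + 1) = pvG' i := by
  simp only [pvG, pvG']
  rcases Nat.even_or_odd i with h | h
  · have e : i % 2 = 0 := Nat.even_iff.mp h
    simp [e, Nat.succ_mod_two_eq_one_iff.mpr e]
  · have e : i % 2 = 1 := Nat.odd_iff.mp h
    simp [e, Nat.succ_mod_two_eq_zero_iff.mpr e]

theorem pvG'_succ (i : Nat) : pvG' (i + 1) = pvG i := by
  simp only [pvG, pvG']
  rcases Nat.even_or_odd i with h | h
  · have e : i % 2 = 0 := Nat.even_iff.mp h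
    simp [e, Nat.succ_mod_two_eq_one_iff.mpr e]
  · have e : i % 2 = 1 := Nat.odd_iff.mp h
    simp [e, Nat.succ_mod_two_eq_zero_iff.mpr e]

theorem pv_fold (cs : List Char) : ∀ d : List String,
    (cs.foldl pvStepA (d, "S") =
      (d ++ (List.range cs.length).map pvG, if cs.length % 2 = 0 then "S" else "A")) ∧
    (cs.foldl pvStepA (d, "A") =
      (d ++ (List.range cs.length).map pvG', if cs.length % 2 = 0 then "A" else "S")) := by
  induction cs with
  | nil => intro d; simp
  | cons c cs ih =>
    intro d
    have hmG : (List.map (· + 1) (List.range cs.length)).map pvG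
        = (List.range cs.length).map pvG' := by
      rw [List.map_map]; exact List.map_congr_left (fun i _ => pvG_succ i)
    have hmG' : (List.map (· + 1) (List.range cs.length)).map pvG'
        = (List.range cs.length).map pvG := by
      rw [List.map_map]; exact List.map_congr_left (fun i _ => pvG'_succ i)
    have hpar : ∀ a b : String, (if (cs.length + 1) % 2 = 0 then a else b)
        = (if cs.length % 2 = 0 then b else a) := by
      intro a b
      rcases Nat.even_or_odd cs.length with h2 | h2
      · have e : cs.length % 2 = 0 := Nat.even_iff.mp h2
        simp [e, Nat.succ_mod_two_eq_one_iff.mpr e]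
      · have e : cs.length % 2 = 1 := Nat.odd_iff.mp h2
        simp [e, Nat.succ_mod_two_eq_zero_iff.mpr e]
    constructor
    · rw [List.foldl_cons, pvStepA_S, (ih (d ++ ["S -> aA"])).2,
        List.length_cons, List.range_succ_eq_map, List.map_cons, hmG, hpar]
      refine Prod.ext_iff.mpr ⟨?_, rfl⟩
      show d ++ ["S -> aA"] ++ _ = d ++ (pvG 0 :: _)
      simp [pvG]
    · rw [List.foldl_cons, pvStepA_A, (ih (d ++ ["A -> aS"])).1,
        List.length_cons, List.range_succ_eq_map, List.map_cons, hmG', hpar]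
      refine Prod.ext_iff.mpr ⟨?_, rfl⟩
      show d ++ ["A -> aS"] ++ _ = d ++ (pvG' 0 :: _)
      simp [pvG']

-- ===== VERDICT (by name: the statement is the Claim_ definition above) =====
theorem generate_derivation_spec : Claim_equal_generate_derivation := by
  intro s _
  unfold Spec_generate_derivation generate_derivation generate_derivation_alt
  rw [(pv_fold s.toList ["S"]).1]
  rcases Nat.even_or_odd s.toList.length with h2 | h2
  · have e : s.length % 2 = 0 := by rw [← String.length_toList]; exact Nat.even_iff.mp h2
    simp [e]
  · have e : s.length % 2 = 1 := by rw [← String.length_toList]; exact Nat.odd_iff.mp h2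
    simp [e]
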